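-- pv_equiv track=rewrite | github.com/TanguyMoreau99/holbertonschool-Markdown2HTML | markdown2html.py | convert_markdown_paragraph_to_html
-- ===== SOURCE A (Python) =====
-- def starts_with_html_tag(line):
--     """ Check if the line starts with an HTML tag """
--     return line.lstrip().startswith((
--         '<h', '<ul', '<ol', '<li', '</ul>', '</ol>'
--     ))
--
-- def convert_markdown_paragraph_to_html(lines):
--     html_lines = []
--     paragraph = []
--
--     for line in lines:
--         if not starts_with_html_tag(line) and line.strip() != '':
--             paragraph.append(line.strip())
--         else:
--             if paragraph:
--                 html_lines.append(
--                     '<p>\n' + '\n<br/>\n'.join(paragraph) + '\n</p>\n')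
--                 paragraph = []
--             if line.strip() != '':
--                 html_lines.append(line)
--
--     if paragraph:
--         html_lines.append('<p>\n' + '\n<br/>\n'.join(paragraph) + '\n</p>\n')
--
--     return html_lines
-- ===== SOURCE B (Python) =====
-- def convert_markdown_paragraph_to_html(lines):
--     def is_paragraph(line):
--         return (line.strip() != ''
--                 and not line.lstrip().startswith((
--                     '<h', '<ul', '<ol', '<li', '</ul>', '</ol>')))
--
--     html_lines = []
--     i, n = 0, len(lines)
--     while i < n:
--         if is_paragraph(lines[i]):
--             j = i + 1
--             while j < n and is_paragraph(lines[j]):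
--                 j += 1
--             html_lines.append(
--                 '<p>\n' + '\n<br/>\n'.join(l.strip() for l in lines[i:j])
--                 + '\n</p>\n')
--             i = j
--         else:
--             if lines[i].strip() != '':
--                 html_lines.append(lines[i])
--             i += 1
--     return html_lines
-- ===== Notes on version B (the rewrite author's own statement) =====
-- stated objective: alternative
-- what changed: Replaces A's accumulate-and-flush fold carrying a pending-paragraph buffer with a chunk scan that finds each maximal run of paragraph lines (span/takeWhile) and wraps it in one step, handling non-paragraph lines in between.
import Mathlib
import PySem

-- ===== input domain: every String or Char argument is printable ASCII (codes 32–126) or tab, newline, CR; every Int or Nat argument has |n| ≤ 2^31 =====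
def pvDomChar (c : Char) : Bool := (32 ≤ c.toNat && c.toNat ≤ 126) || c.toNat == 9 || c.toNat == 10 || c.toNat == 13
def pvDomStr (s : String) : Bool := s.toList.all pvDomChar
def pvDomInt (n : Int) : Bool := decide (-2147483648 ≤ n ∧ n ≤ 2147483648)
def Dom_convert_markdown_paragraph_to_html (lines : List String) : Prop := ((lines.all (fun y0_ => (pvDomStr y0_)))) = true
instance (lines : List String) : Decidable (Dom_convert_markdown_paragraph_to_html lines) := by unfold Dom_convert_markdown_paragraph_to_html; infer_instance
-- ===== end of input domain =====

-- B replaces A's accumulate-and-flush fold by a chunk scan over maximal paragraph runs (simpler decomposition; same cost).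


-- ===== PORT A =====
def starts_with_html_tag (line : String) : Bool :=
  ["<h", "<ul", "<ol", "<li", "</ul>", "</ol>"].any
    (fun p => PySem.Str.startswith (PySem.Str.lstrip line) p)

def pvAStep (st : List String × List String) (line : String) : List String × List String :=
  if !starts_with_html_tag line && PySem.Str.strip line ≠ "" then
    (st.1, st.2 ++ [PySem.Str.strip line])
  else
    let h := if st.2 ≠ [] then
        st.1 ++ ["<p>\n" ++ PySem.Str.join "\n<br/>\n" st.2 ++ "\n</p>\n"]
      else st.1
    (if PySem.Str.strip line ≠ "" then h ++ [line] else h, [])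

def convert_markdown_paragraph_to_html (lines : List String) : List String :=
  let st := lines.foldl pvAStep ([], [])
  if st.2 ≠ [] then
    st.1 ++ ["<p>\n" ++ PySem.Str.join "\n<br/>\n" st.2 ++ "\n</p>\n"]
  else st.1

-- ===== PORT B =====
def pvIsParagraph (line : String) : Bool :=
  PySem.Str.strip line ≠ "" &&
  !(["<h", "<ul", "<ol", "<li", "</ul>", "</ol>"].any
      (fun p => PySem.Str.startswith (PySem.Str.lstrip line) p))

def pvWrap (para : List String) : String :=
  "<p>\n" ++ PySem.Str.join "\n<br/>\n" para ++ "\n</p>\n"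

def convert_markdown_paragraph_to_html_alt : List String → List String
  | [] => []
  | l :: ls =>
    if h : pvIsParagraph l then
      pvWrap (((l :: ls).takeWhile pvIsParagraph).map PySem.Str.strip)
        :: convert_markdown_paragraph_to_html_alt ((l :: ls).dropWhile pvIsParagraph)
    else
      (if PySem.Str.strip l ≠ "" then [l] else [])
        ++ convert_markdown_paragraph_to_html_alt ls
termination_by ls => ls.length
decreasing_by
  · simp only [List.dropWhile_cons, h, if_true]
    exact Nat.lt_succ_of_le (List.length_dropWhile_le _ _)
  · simp

-- ===== PRECONDITION & SPEC =====
def Spec_convert_markdown_paragraph_to_html (lines : List String) (out : List String) : Prop := out = convert_markdown_paragraph_to_html_alt lines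
instance (lines : List String) (out : List String) : Decidable (Spec_convert_markdown_paragraph_to_html lines out) := by unfold Spec_convert_markdown_paragraph_to_html; infer_instance

-- ===== CLAIM (what is proved, stated in full; the proofs are below) =====
def Claim_equal_convert_markdown_paragraph_to_html : Prop := ∀ (lines : List String), Dom_convert_markdown_paragraph_to_html lines → Spec_convert_markdown_paragraph_to_html lines (convert_markdown_paragraph_to_html lines)

-- ===== LEMMAS AND PROOFS =====

-- A's per-line test equals B's paragraph predicate.
theorem pvCond_eq (l : String) :
    (!starts_with_html_tag l && PySem.Str.strip l ≠ "") = pvIsParagraph l := by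
  simp [starts_with_html_tag, pvIsParagraph, Bool.and_comm]

-- A's loop, re-expressed as structural recursion carrying only the pending paragraph.
def pvAux (para : List String) : List String → List String
  | [] => if para ≠ [] then [pvWrap para] else []
  | l :: ls =>
    if pvIsParagraph l then
      pvAux (para ++ [PySem.Str.strip l]) ls
    else
      (if para ≠ [] then [pvWrap para] else [])
        ++ (if PySem.Str.strip l ≠ "" then [l] else []) ++ pvAux [] ls

theorem pvFoldA (ls : List String) (html para : List String) :
    (let st := ls.foldl pvAStep (html, para)
     if st.2 ≠ [] then st.1 ++ [pvWrap st.2] else st.1)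
    = html ++ pvAux para ls := by
  induction ls generalizing html para with
  | nil =>
    simp only [List.foldl_nil, pvAux]
    split <;> simp
  | cons l ls ih =>
    simp only [List.foldl_cons, pvAux, pvAStep, pvCond_eq l]
    by_cases hp : pvIsParagraph l
    · simp only [hp, if_true]
      exact ih _ _
    · simp only [hp, if_false, Bool.false_eq_true]
      rw [ih]
      by_cases hs : PySem.Str.strip l ≠ "" <;>
        by_cases hq : para ≠ [] <;>
          simp [hs, hq, pvWrap, List.append_assoc]

theorem pvAux_eq (ls : List String) (para : List String) :
    pvAux para ls =
      if para = [] then convert_markdown_paragraph_to_html_alt ls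
      else pvWrap (para ++ (ls.takeWhile pvIsParagraph).map PySem.Str.strip)
             :: convert_markdown_paragraph_to_html_alt (ls.dropWhile pvIsParagraph) := by
  induction ls generalizing para with
  | nil =>
    by_cases hq : para = [] <;>
      simp [pvAux, hq, convert_markdown_paragraph_to_html_alt]
  | cons l ls ih =>
    by_cases hp : pvIsParagraph l
    · have h1 : pvAux para (l :: ls) = pvAux (para ++ [PySem.Str.strip l]) ls := by
        simp [pvAux, hp]
      rw [h1, ih]
      have hne : para ++ [PySem.Str.strip l] ≠ [] := by simp
      simp only [hne]
      by_cases hq : para = []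
      · subst hq
        simp [convert_markdown_paragraph_to_html_alt, hp]
      · simp [hq, hp]
    · have h1 : pvAux para (l :: ls) =
          (if para ≠ [] then [pvWrap para] else [])
            ++ (if PySem.Str.strip l ≠ "" then [l] else []) ++ pvAux [] ls := by
        simp [pvAux, hp]
      rw [h1, ih]
      by_cases hq : para = []
      · simp [hq, convert_markdown_paragraph_to_html_alt, hp]
      · simp [hq, hp, convert_markdown_paragraph_to_html_alt]

-- ===== VERDICT (by name: the statement is the Claim_ definition above) =====
theorem convert_markdown_paragraph_to_html_spec : Claim_equal_convert_markdown_paragraph_to_html := by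
  intro lines _
  show convert_markdown_paragraph_to_html lines = convert_markdown_paragraph_to_html_alt lines
  have := pvFoldA lines [] []
  simpa [convert_markdown_paragraph_to_html, pvWrap, pvAux_eq] using this
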